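-- pv_equiv track=rewrite | github.com/FranciscoTGouveia/ProjetosIST | 1ºAno/Fundamentos da Programação/Projeto_1/projeto.py | eh_cifra
-- ===== SOURCE A (Python) =====
-- def eh_cifra(cifra):
--     if type(cifra) != str or not cifra:
--         return False
--     for index, carater in enumerate(cifra):
--         if carater == "-":
--             if not 0 < index < (len(cifra)-1):
--                 return False
--             elif not (cifra[index - 1].isalpha() and cifra[index + 1].isalpha()):
--                 return False
--         elif not((carater.islower() and carater.isalpha()) or carater == "-"):
--             return False
--     return True
-- ===== SOURCE B (Python) =====
-- def eh_cifra(cifra):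
--     if type(cifra) != str:
--         return False
--     return all(w != "" and all(c.isalpha() and c.islower() for c in w)
--                for w in cifra.split("-"))
-- ===== Notes on version B (the rewrite author's own statement) =====
-- stated objective: simpler
-- what changed: B tokenizes the string by splitting at the hyphen separator and validates each token (nonempty, all lowercase letters), instead of A's single character scan with index-based neighbor checks around each hyphen.
import Mathlib
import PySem

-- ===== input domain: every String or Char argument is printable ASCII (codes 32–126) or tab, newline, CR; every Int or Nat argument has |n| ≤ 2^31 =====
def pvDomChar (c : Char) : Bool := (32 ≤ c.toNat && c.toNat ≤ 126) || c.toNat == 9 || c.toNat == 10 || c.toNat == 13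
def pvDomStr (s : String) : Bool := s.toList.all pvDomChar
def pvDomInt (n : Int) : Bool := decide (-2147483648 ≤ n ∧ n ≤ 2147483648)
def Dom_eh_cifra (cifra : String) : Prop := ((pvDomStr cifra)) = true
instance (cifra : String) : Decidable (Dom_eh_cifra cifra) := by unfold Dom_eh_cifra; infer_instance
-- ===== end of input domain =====

-- B splits the string at hyphens and checks every token is a nonempty run of lowercase letters,
-- instead of A's per-character scan with index-based neighbor checks (objective: simpler).

-- ===== PORT A =====
-- for index, carater in enumerate(cifra): … return False / final return True  ⇒  .all over enumerate
def eh_cifra (cifra : String) : Bool :=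
  if cifra.toList = [] then false
  else
    (PySem.List.enumerate cifra.toList 0).all (fun p =>
      if p.2 = '-' then
        if ¬ (0 < p.1 ∧ p.1 < (PySem.Str.len cifra) - 1) then false
        else ((PySem.List.pyGet? cifra.toList (p.1 - 1)).elim false PySem.Str.isalpha)
             && ((PySem.List.pyGet? cifra.toList (p.1 + 1)).elim false PySem.Str.isalpha)
      else PySem.Str.islower p.2 && PySem.Str.isalpha p.2)

-- ===== PORT B =====
-- all(w != "" and all(c.isalpha() and c.islower() for c in w) for w in cifra.split(sep))
-- cifra.split("-") → PySem.Str.split? with the nonempty literal separator (getD [] is unreachable)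
def eh_cifra_alt (cifra : String) : Bool :=
  ((PySem.Str.split? cifra "-").getD []).all (fun w =>
    w != "" && w.toList.all (fun c => PySem.Str.isalpha c && PySem.Str.islower c))

-- ===== PRECONDITION & SPEC =====
def Spec_eh_cifra (cifra : String) (out : Bool) : Prop := out = eh_cifra_alt cifra
instance (cifra : String) (out : Bool) : Decidable (Spec_eh_cifra cifra out) := by unfold Spec_eh_cifra; infer_instance

-- ===== CLAIM (what is proved, stated in full; the proofs are below) =====
def Claim_equal_eh_cifra : Prop := ∀ (cifra : String), Dom_eh_cifra cifra → Spec_eh_cifra cifra (eh_cifra cifra)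

-- ===== LEMMAS AND PROOFS =====

-- lowercase-letter character class
def pvLA (c : Char) : Prop := (PySem.Chars.isalpha c && PySem.Chars.islower c) = true

-- the clean characterization both ports are reduced to
def pvOk (cs : List Char) : Prop :=
  cs ≠ [] ∧ cs.head? ≠ some '-' ∧ cs.getLast? ≠ some '-' ∧
  ¬ ['-', '-'] <:+: cs ∧ ∀ c ∈ cs, c = '-' ∨ pvLA c

-- structural model of splitting on '-' (proof-side only)
def pvMySplit (pre : List Char) : List Char → List (List Char)
  | [] => [pre]
  | c :: rest => if c = '-' then pre :: pvMySplit [] rest else pvMySplit (pre ++ [c]) rest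

lemma one_prefix_iff (xs : List Char) : ['-'] <+: xs ↔ xs.head? = some '-' := by
  cases xs with
  | nil => simp
  | cons a l => simp [List.cons_prefix_cons, eq_comm]

lemma inf_cons (x : Char) (xs : List Char) :
    ['-', '-'] <:+: (x :: xs) ↔ (x = '-' ∧ xs.head? = some '-') ∨ ['-', '-'] <:+: xs := by
  rw [List.infix_cons_iff, List.cons_prefix_cons, one_prefix_iff, eq_comm]

lemma pair_infix_iff (cs : List Char) :
    ['-', '-'] <:+: cs ↔ ∃ i : Nat, ∃ h : i + 1 < cs.length, cs[i] = '-' ∧ cs[i+1] = '-' := by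
  constructor
  · rintro ⟨s, t, rfl⟩
    have hl : s.length + 1 < (s ++ ['-', '-'] ++ t).length := by simp
    refine ⟨s.length, hl, ?_, ?_⟩
    · simp
    · simp
  · rintro ⟨i, h, h1, h2⟩
    refine ⟨cs.take i, cs.drop (i+2), ?_⟩
    conv_rhs => rw [← List.take_append_drop i cs,
      List.drop_eq_getElem_cons (by omega : i < cs.length),
      List.drop_eq_getElem_cons (by omega : i + 1 < cs.length)]
    simp [h1, h2]

lemma pyGet?_neg_one (cs : List Char) (h : 0 < cs.length) :
    PySem.List.pyGet? cs (-1) = some (cs[cs.length - 1]'(by omega)) := by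
  have h1 : 1 ≤ cs.length := h
  simp [PySem.List.pyGet?, PySem.List.pyIdx?, h1]

lemma main_iff (cs : List Char) (hlen : 0 < cs.length) :
    (∀ (x : ℤ × Char) (k : ℕ) (hk : k < cs.length),
        x = (↑k, cs[k]) →
          (if x.2 = '-' then
              if ¬(0 < x.1 ∧ x.1 < (cs.length : ℤ) - 1) then false
              else
                (PySem.List.pyGet? cs (x.1 - 1)).elim false PySem.Str.isalpha &&
                  (PySem.List.pyGet? cs (x.1 + 1)).elim false PySem.Str.isalpha
            else PySem.Str.islower x.2 && PySem.Str.isalpha x.2) =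
            true) ↔
      (if (PySem.List.pyGet? cs 0 = some '-' ∨ PySem.List.pyGet? cs (-1) = some '-') ∨
            "--".toList <:+: cs then false
        else cs.all fun c => c == '-' || PySem.Str.islower c && PySem.Str.isalpha c) =
        true := by
  have h0 : PySem.List.pyGet? cs 0 = some (cs[0]'hlen) := by
    have := PySem.List.pyGet?_natCast cs 0
    simpa [List.getElem?_eq_getElem hlen] using this
  have hneg : PySem.List.pyGet? cs (-1) = some (cs[cs.length - 1]'(by omega)) :=
    pyGet?_neg_one cs hlen
  have hpair : ("--".toList <:+: cs) ↔
      ∃ i : Nat, ∃ hi : i + 1 < cs.length, cs[i] = '-' ∧ cs[i+1] = '-' := by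
    have : "--".toList = ['-', '-'] := rfl
    rw [this, pair_infix_iff]
  constructor
  · intro hA
    have hget : ∀ k (hk : k < cs.length), PySem.List.pyGet? cs (↑k : ℤ) = some (cs[k]'hk) := by
      intro k hk
      simp [PySem.List.pyGet?_natCast, List.getElem?_eq_getElem hk]
    have hF : ∀ k (hk : k < cs.length), cs[k] = '-' →
        ∃ h2 : k + 1 < cs.length, 0 < k ∧ PySem.Str.isalpha (cs[k-1]'(by omega)) = true ∧
          PySem.Str.isalpha (cs[k+1]'h2) = true := by
      intro k hk hc
      have := hA (↑k, cs[k]) k hk rfl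
      rw [if_pos hc] at this
      by_cases hg2 : 0 < (k : ℤ) ∧ (k : ℤ) < ↑cs.length - 1
      · rw [if_neg (not_not_intro hg2)] at this
        have hk1 : 0 < k := by exact_mod_cast hg2.1
        have hk2 : k + 1 < cs.length := by omega
        have e1 : ((k : ℤ) - 1) = ((k - 1 : ℕ) : ℤ) := by omega
        have e2 : ((k : ℤ) + 1) = ((k + 1 : ℕ) : ℤ) := by omega
        rw [e1, e2, hget (k-1) (by omega), hget (k+1) hk2] at this
        simp only [Option.elim_some, Bool.and_eq_true] at this
        exact ⟨hk2, hk1, this.1, this.2⟩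
      · rw [if_pos hg2] at this; exact absurd this (by simp)
    have hclass : ∀ c ∈ cs, c = '-' ∨ (PySem.Str.islower c && PySem.Str.isalpha c) = true := by
      intro c hc
      obtain ⟨k, hk, rfl⟩ := List.mem_iff_getElem.mp hc
      by_cases hd : cs[k] = '-'
      · exact Or.inl hd
      · have := hA (↑k, cs[k]) k hk rfl
        rw [if_neg hd] at this
        exact Or.inr this
    have hC : ¬ ((PySem.List.pyGet? cs 0 = some '-' ∨ PySem.List.pyGet? cs (-1) = some '-') ∨
        "--".toList <:+: cs) := by
      rintro ((hx | hx) | hx)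
      · rw [h0] at hx
        have hc0 : cs[0]'hlen = '-' := by simpa using hx
        obtain ⟨-, h', -, -⟩ := hF 0 hlen hc0
        omega
      · rw [hneg] at hx
        have hcl : cs[cs.length - 1]'(by omega) = '-' := by simpa using hx
        obtain ⟨h2, -, -, -⟩ := hF (cs.length - 1) (by omega) hcl
        omega
      · obtain ⟨i, hi, h1, h2⟩ := hpair.mp hx
        obtain ⟨hw, -, -, ha2⟩ := hF i (by omega) h1
        rw [h2] at ha2
        exact absurd ha2 (by decide)
    rw [if_neg hC]
    simp only [List.all_eq_true, Bool.or_eq_true, beq_iff_eq]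
    exact hclass
  · intro hB
    by_cases hC : ((PySem.List.pyGet? cs 0 = some '-' ∨ PySem.List.pyGet? cs (-1) = some '-') ∨
        "--".toList <:+: cs)
    · rw [if_pos hC] at hB; exact absurd hB (by simp)
    rw [if_neg hC] at hB
    simp only [List.all_eq_true, Bool.or_eq_true, beq_iff_eq] at hB
    simp only [not_or] at hC
    obtain ⟨⟨hc0, hcl⟩, hinf⟩ := hC
    rw [h0] at hc0; rw [hneg] at hcl
    have hc0' : cs[0]'hlen ≠ '-' := by simpa using hc0
    have hcl' : cs[cs.length - 1]'(by omega) ≠ '-' := by simpa using hcl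
    have hnopair : ∀ i : Nat, ∀ hi : i + 1 < cs.length, ¬ (cs[i] = '-' ∧ cs[i+1] = '-') := by
      intro i hi hcontra
      exact hinf (hpair.mpr ⟨i, hi, hcontra.1, hcontra.2⟩)
    rintro x k hk rfl
    dsimp only
    by_cases hd : cs[k] = '-'
    · rw [if_pos hd]
      have hk0 : 0 < k := by
        rcases Nat.eq_zero_or_pos k with h | h
        · subst h; exact absurd hd hc0'
        · exact h
      have hkl : k + 1 < cs.length := by
        rcases Nat.lt_or_ge (k+1) cs.length with h | h
        · exact h
        · have : k = cs.length - 1 := by omega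
          subst this; exact absurd hd hcl'
      have hguard : 0 < (k : ℤ) ∧ (k : ℤ) < ↑cs.length - 1 := by
        constructor <;> [exact_mod_cast hk0; omega]
      rw [if_neg (not_not_intro hguard)]
      have hget : ∀ j (hj : j < cs.length), PySem.List.pyGet? cs (↑j : ℤ) = some (cs[j]'hj) := by
        intro j hj
        simp [PySem.List.pyGet?_natCast, List.getElem?_eq_getElem hj]
      have e1 : ((k : ℤ) - 1) = ((k - 1 : ℕ) : ℤ) := by omega
      have e2 : ((k : ℤ) + 1) = ((k + 1 : ℕ) : ℤ) := by omega
      rw [e1, e2, hget (k-1) (by omega), hget (k+1) hkl]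
      simp only [Option.elim_some, Bool.and_eq_true]
      have halpha : ∀ j (hj : j < cs.length), j + 1 < cs.length ∨ 0 < j →
          (j + 1 = k ∨ j = k + 1) → PySem.Str.isalpha (cs[j]'hj) = true := by
        intro j hj _ _
        rcases hB cs[j] (List.getElem_mem hj) with h | h
        · exfalso
          rcases ‹j + 1 = k ∨ j = k + 1› with he | he
          · subst he
            exact hnopair j (by omega) ⟨h, hd⟩
          · subst he
            exact hnopair k (by omega) ⟨hd, h⟩
        · simp only [Bool.and_eq_true] at h
          exact h.2
      exact ⟨halpha (k-1) (by omega) (Or.inl (by omega)) (Or.inl (by omega)),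
             halpha (k+1) hkl (Or.inr (by omega)) (Or.inr rfl)⟩
    · rw [if_neg hd]
      rcases hB cs[k] (List.getElem_mem hk) with h | h
      · exact absurd h hd
      · exact h

lemma A_iff (cifra : String) : eh_cifra cifra = true ↔ pvOk cifra.toList := by
  by_cases hemp : cifra.toList = []
  · simp [eh_cifra, hemp, pvOk]
  · have hlen : 0 < cifra.toList.length := List.length_pos_iff.mpr hemp
    have h0 : PySem.List.pyGet? cifra.toList 0 = some (cifra.toList[0]'hlen) := by
      have := PySem.List.pyGet?_natCast cifra.toList 0
      simpa [List.getElem?_eq_getElem hlen] using this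
    have hneg : PySem.List.pyGet? cifra.toList (-1) =
        some (cifra.toList[cifra.toList.length - 1]'(by omega)) :=
      pyGet?_neg_one cifra.toList hlen
    have step1 : eh_cifra cifra = true ↔
        (if (PySem.List.pyGet? cifra.toList 0 = some '-' ∨
              PySem.List.pyGet? cifra.toList (-1) = some '-') ∨
              "--".toList <:+: cifra.toList then false
          else cifra.toList.all fun c =>
            c == '-' || PySem.Str.islower c && PySem.Str.isalpha c) = true := by
      unfold eh_cifra
      rw [if_neg hemp, List.all_eq_true]
      constructor
      · intro hA
        refine (main_iff _ hlen).mp ?_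
        rintro x k hk rfl
        have hmem : ((k : ℤ), cifra.toList[k]) ∈ PySem.List.enumerate cifra.toList 0 := by
          rw [PySem.List.mem_enumerate_iff]
          exact ⟨k, hk, by simp⟩
        simpa [PySem.Str.len_eq] using hA _ hmem
      · intro hB p hp
        rw [PySem.List.mem_enumerate_iff] at hp
        obtain ⟨k, hk, hpk⟩ := hp
        have := (main_iff _ hlen).mpr hB p k hk (by simpa using hpk)
        simpa [PySem.Str.len_eq] using this
    rw [step1]
    have hhead : cifra.toList.head? = some (cifra.toList[0]'hlen) := by
      rw [List.head?_eq_getElem?, List.getElem?_eq_getElem hlen]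
    have hlast : cifra.toList.getLast? =
        some (cifra.toList[cifra.toList.length - 1]'(by omega)) := by
      rw [List.getLast?_eq_getElem?, List.getElem?_eq_getElem (by omega)]
    constructor
    · intro h
      by_cases hC : ((PySem.List.pyGet? cifra.toList 0 = some '-' ∨
          PySem.List.pyGet? cifra.toList (-1) = some '-') ∨ "--".toList <:+: cifra.toList)
      · rw [if_pos hC] at h; exact absurd h (by simp)
      · rw [if_neg hC] at h
        simp only [not_or, h0, hneg] at hC
        obtain ⟨⟨hc0, hcl⟩, hinf⟩ := hC
        refine ⟨hemp, ?_, ?_, by simpa using hinf, ?_⟩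
        · rw [hhead]; simpa using hc0
        · rw [hlast]; simpa using hcl
        · intro c hc
          have := (List.all_eq_true.mp h) c hc
          simp only [Bool.or_eq_true, beq_iff_eq, Bool.and_eq_true] at this
          rcases this with h' | h'
          · exact Or.inl h'
          · exact Or.inr (by
              simp only [pvLA, Bool.and_eq_true]
              simp only [PySem.Str.islower, PySem.Str.isalpha] at h'
              exact ⟨h'.2, h'.1⟩)
    · rintro ⟨-, hh, hl, hi, hcl⟩
      rw [hhead] at hh; rw [hlast] at hl
      rw [if_neg (by
        simp only [not_or, h0, hneg]
        refine ⟨⟨by simpa using hh, by simpa using hl⟩, by simpa using hi⟩)]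
      rw [List.all_eq_true]
      intro c hc
      rcases hcl c hc with h' | h'
      · simp [h']
      · simp only [Bool.or_eq_true, beq_iff_eq, Bool.and_eq_true]
        refine Or.inr ?_
        simp only [pvLA, Bool.and_eq_true] at h'
        simp only [PySem.Str.islower, PySem.Str.isalpha]
        exact ⟨h'.2, h'.1⟩


lemma mySplit_forall (l : List Char) : ∀ pre : List Char,
    (∀ w ∈ pvMySplit pre l, w ≠ [] ∧ ∀ c ∈ w, pvLA c) ↔
      ((∀ c ∈ pre, pvLA c) ∧ (pre = [] → l ≠ [] ∧ l.head? ≠ some '-') ∧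
        l.getLast? ≠ some '-' ∧ ¬ ['-', '-'] <:+: l ∧ ∀ c ∈ l, c = '-' ∨ pvLA c) := by
  induction l with
  | nil =>
    intro pre
    simp only [pvMySplit, List.mem_singleton, forall_eq, List.getLast?_nil, List.head?_nil]
    constructor
    · rintro ⟨h1, h2⟩
      exact ⟨h2, fun h => absurd h h1, by simp, by simp, by simp⟩
    · rintro ⟨h1, h2, -, -, -⟩
      refine ⟨?_, h1⟩
      intro h; exact (h2 h).1 rfl
  | cons c rest ih =>
    intro pre
    by_cases hc : c = '-'
    · subst hc
      rw [show pvMySplit pre ('-' :: rest) = pre :: pvMySplit [] rest from by simp [pvMySplit]]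
      rw [List.forall_mem_cons, ih []]
      cases rest with
      | nil =>
        simp only [List.getLast?_singleton]
        constructor
        · rintro ⟨-, -, h, -⟩; exact ((h (by simp)).1 rfl).elim
        · rintro ⟨-, -, h, -⟩; exact absurd rfl h
      | cons d rest' =>
        rw [List.getLast?_cons_cons, inf_cons '-' (d :: rest')]
        constructor
        · rintro ⟨⟨hpne, hpcl⟩, -, h2, hl, hi, hcl⟩
          have hh := (h2 rfl).2
          refine ⟨hpcl, fun h => absurd h hpne, hl, ?_, ?_⟩
          · rintro (⟨-, h⟩ | h)
            · exact hh h
            · exact hi h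
          · intro x hx
            rcases List.mem_cons.mp hx with rfl | hx'
            · exact Or.inl rfl
            · exact hcl x hx'
        · rintro ⟨hpcl, hne, hl, hi, hcl⟩
          have hpne : pre ≠ [] := fun h => (hne h).2 rfl
          refine ⟨⟨hpne, hpcl⟩, by simp, fun _ => ⟨by simp, ?_⟩, hl, ?_, ?_⟩
          · intro h; exact hi (Or.inl ⟨rfl, h⟩)
          · intro h; exact hi (Or.inr h)
          · intro x hx; exact hcl x (List.mem_cons_of_mem _ hx)
    · rw [show pvMySplit pre (c :: rest) = pvMySplit (pre ++ [c]) rest from by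
        simp [pvMySplit, hc]]
      rw [ih (pre ++ [c])]
      have hgl : (c :: rest).getLast? = if rest = [] then some c else rest.getLast? := by
        cases rest with
        | nil => simp
        | cons d r => simp [List.getLast?_cons_cons]
      constructor
      · rintro ⟨hcl', -, hl, hi, hcl⟩
        have hLAc : pvLA c := hcl' c (by simp)
        refine ⟨fun x hx => hcl' x (by simp [hx]), fun _ => ⟨by simp, by simp [hc]⟩, ?_, ?_, ?_⟩
        · rw [hgl]; split_ifs with h
          · subst h; simpa using fun h' => hc h'
          · simpa [h] using hl
        · rw [inf_cons]
          rintro (⟨h, -⟩ | h)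
          · exact hc h
          · exact hi h
        · intro x hx
          rcases List.mem_cons.mp hx with rfl | hx'
          · exact Or.inr hLAc
          · exact hcl x hx'
      · rintro ⟨hpcl, -, hl, hi, hcl⟩
        have hLAc : pvLA c := by
          rcases hcl c (by simp) with h | h
          · exact absurd h hc
          · exact h
        refine ⟨?_, by simp, ?_, ?_, ?_⟩
        · intro x hx
          rcases List.mem_append.mp hx with h | h
          · exact hpcl x h
          · simpa [List.mem_singleton.mp h] using hLAc
        · rw [hgl] at hl; split_ifs at hl with h
          · simp [h]
          · exact hl
        · intro h; exact hi ((inf_cons c rest).mpr (Or.inr h))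
        · intro x hx; exact hcl x (List.mem_cons_of_mem _ hx)

lemma go_eq (fuel : Nat) : ∀ (l cur : List Char) (accs : List (List Char)),
    l.length ≤ fuel →
    PySem.Chars.splitOn.go ['-'] fuel l cur accs = accs.reverse ++ pvMySplit cur.reverse l := by
  induction fuel with
  | zero =>
    intro l cur accs hle
    have : l = [] := List.length_eq_zero_iff.mp (Nat.le_zero.mp hle)
    subst this
    simp [PySem.Chars.splitOn.go, pvMySplit]
  | succ n ih =>
    intro l cur accs hle
    cases l with
    | nil => simp [PySem.Chars.splitOn.go, pvMySplit]
    | cons c rest =>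
      by_cases hc : c = '-'
      · subst hc
        rw [show PySem.Chars.splitOn.go ['-'] (n+1) ('-' :: rest) cur accs =
              PySem.Chars.splitOn.go ['-'] n (List.drop 1 ('-' :: rest)) [] (cur.reverse :: accs) from by
                simp [PySem.Chars.splitOn.go, List.isPrefixOf]]
        rw [List.drop_one, List.tail_cons,
          ih rest [] (cur.reverse :: accs) (by simp at hle ⊢; omega)]
        simp [pvMySplit]
      · rw [show PySem.Chars.splitOn.go ['-'] (n+1) (c :: rest) cur accs =
              PySem.Chars.splitOn.go ['-'] n rest (c :: cur) accs from by
                simp [PySem.Chars.splitOn.go, List.isPrefixOf, Ne.symm hc]]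
        rw [ih rest (c :: cur) accs (by simp at hle ⊢; omega)]
        simp [pvMySplit, hc]

lemma splitOn_eq (cs : List Char) : PySem.Chars.splitOn cs ['-'] = pvMySplit [] cs := by
  rw [PySem.Chars.splitOn, go_eq (cs.length + 1) cs [] [] (by omega)]
  simp

lemma B_iff (cifra : String) : eh_cifra_alt cifra = true ↔ pvOk cifra.toList := by
  have hsplit : PySem.Str.split? cifra "-" =
      some ((pvMySplit [] cifra.toList).map String.ofList) := by
    rw [PySem.Str.split?]
    simp [PySem.Chars.split?, splitOn_eq, show ("-" : String).toList = ['-'] from rfl]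
  rw [eh_cifra_alt, hsplit]
  simp only [Option.getD_some, List.all_map, List.all_eq_true, Function.comp]
  have : ∀ t : List Char,
      ((String.ofList t != "") && (String.ofList t).toList.all
        (fun c => PySem.Str.isalpha c && PySem.Str.islower c)) = true ↔
      (t ≠ [] ∧ ∀ c ∈ t, pvLA c) := by
    intro t
    simp only [Bool.and_eq_true, bne_iff_ne, String.toList_ofList, List.all_eq_true]
    constructor
    · rintro ⟨h1, h2⟩
      refine ⟨fun h => h1 (by simp [h]), fun c hc => by simpa [pvLA] using h2 c hc⟩
    · rintro ⟨h1, h2⟩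
      refine ⟨fun h => h1 (by simpa using congrArg String.toList h), fun c hc => by
        simpa [pvLA] using h2 c hc⟩
  constructor
  · intro h
    have := (mySplit_forall cifra.toList []).mp (fun w hw => (this w).mp (h w hw))
    exact ⟨(this.2.1 rfl).1, (this.2.1 rfl).2, this.2.2.1, this.2.2.2.1, this.2.2.2.2⟩
  · rintro ⟨h1, h2, h3, h4, h5⟩
    intro w hw
    exact (this w).mpr ((mySplit_forall cifra.toList []).mpr
      ⟨by simp, fun _ => ⟨h1, h2⟩, h3, h4, h5⟩ w hw)

-- ===== VERDICT (by name: the statement is the Claim_ definition above) =====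
theorem eh_cifra_spec : Claim_equal_eh_cifra := by
  intro cifra _
  unfold Spec_eh_cifra
  rw [Bool.eq_iff_iff]
  exact Iff.trans (A_iff cifra) (B_iff cifra).symm
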